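-- pv_equiv track=rewrite | github.com/Fusion-thermo/Packing-chromatic | packing chromatic grid.py | even_indices
-- ===== SOURCE A (Python) =====
-- def even_indices(i0,j0,k,n):
--     #i,j is the lowest i cell in the diamond
--     #we consider for the calculation that it is in the center, it's corrected when added to the list
--     indices=[]
--     d=k//2
--     for i in range(i0-d,i0+d+1):
--         for j in range(j0-d,j0+d+1):
--             if i+d>0 and i+d<=n and j>0 and j<=n and abs(i0-i) + abs(j0-j) <= d:
--                 indices.append((i+d,j))
--     return indices
-- ===== SOURCE B (Python) =====
-- def even_indices(i0, j0, k, n):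
--     # Comprehension over the final (shifted) row index r = i + d directly.
--     d = k // 2
--     return [(r, j)
--             for r in range(max(1, i0), min(n, i0 + 2 * d) + 1)
--             for j in range(max(1, j0 - (d - abs(i0 + d - r))),
--                            min(n, j0 + (d - abs(i0 + d - r))) + 1)]
-- ===== Notes on version B (the rewrite author's own statement) =====
-- stated objective: simpler
-- what changed: B is a single comprehension over the final (shifted) row index r = i + d with arithmetically clamped row and column ranges, so A's nested accumulator loops over the whole (2d+1)x(2d+1) square with a per-cell bounds-and-Manhattan test disappear; B visits only the emitted cells, in the same order.
import Mathlib
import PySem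

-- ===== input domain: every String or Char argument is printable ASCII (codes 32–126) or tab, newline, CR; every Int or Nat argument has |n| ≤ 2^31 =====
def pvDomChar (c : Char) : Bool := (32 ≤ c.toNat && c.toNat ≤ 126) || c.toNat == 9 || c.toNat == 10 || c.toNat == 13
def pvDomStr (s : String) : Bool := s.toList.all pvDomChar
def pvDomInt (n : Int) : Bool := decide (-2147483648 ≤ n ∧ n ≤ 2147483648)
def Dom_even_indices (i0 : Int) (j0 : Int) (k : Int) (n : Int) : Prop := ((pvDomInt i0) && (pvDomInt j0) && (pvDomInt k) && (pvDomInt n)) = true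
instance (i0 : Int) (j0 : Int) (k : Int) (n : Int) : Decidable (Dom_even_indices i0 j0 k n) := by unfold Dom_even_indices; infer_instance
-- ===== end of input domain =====

-- B builds the result as a single comprehension over the final (shifted) row index r = i + d,
-- with arithmetically clamped ranges, replacing A's nested accumulator loops with a per-cell test.

-- ===== PORT A =====
def even_indices (i0 : Int) (j0 : Int) (k : Int) (n : Int) : List (Int × Int) :=
  let d := PySem.Int.floordiv k 2
  (PySem.List.pyRange (i0 - d) (i0 + d + 1) 1).foldl (fun indices i =>
    (PySem.List.pyRange (j0 - d) (j0 + d + 1) 1).foldl (fun indices j =>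
      if 0 < i + d ∧ i + d ≤ n ∧ 0 < j ∧ j ≤ n ∧ |i0 - i| + |j0 - j| ≤ d then
        indices ++ [(i + d, j)]
      else indices) indices) []

-- ===== PORT B =====
def even_indices_alt (i0 : Int) (j0 : Int) (k : Int) (n : Int) : List (Int × Int) :=
  let d := PySem.Int.floordiv k 2
  (PySem.List.pyRange (max 1 i0) (min n (i0 + 2 * d) + 1) 1).flatMap (fun r =>
    (PySem.List.pyRange (max 1 (j0 - (d - |i0 + d - r|)))
        (min n (j0 + (d - |i0 + d - r|)) + 1) 1).map (fun j => (r, j)))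

-- ===== PRECONDITION & SPEC =====
def Spec_even_indices (i0 : Int) (j0 : Int) (k : Int) (n : Int) (out : List (Int × Int)) : Prop := out = even_indices_alt i0 j0 k n
instance (i0 : Int) (j0 : Int) (k : Int) (n : Int) (out : List (Int × Int)) : Decidable (Spec_even_indices i0 j0 k n out) := by unfold Spec_even_indices; infer_instance

-- ===== CLAIM (what is proved, stated in full; the proofs are below) =====
def Claim_equal_even_indices : Prop := ∀ (i0 : Int) (j0 : Int) (k : Int) (n : Int), Dom_even_indices i0 j0 k n → Spec_even_indices i0 j0 k n (even_indices i0 j0 k n)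

-- ===== LEMMAS AND PROOFS =====

-- 'if P: out.append(f(x))' loop, Prop-test form
theorem pvFoldlAppendIte {α β : Type} (l : List α) (P : α → Prop) [DecidablePred P]
    (f : α → β) (acc : List β) :
    l.foldl (fun acc x => if P x then acc ++ [f x] else acc) acc
      = acc ++ (l.filter (fun x => decide (P x))).map f := by
  induction l generalizing acc with
  | nil => simp
  | cons a t ih =>
    by_cases h : P a <;> simp [h, ih, List.append_assoc]

-- filtering a range by an interval predicate yields the clamped range
theorem pvFilterPyRangeInterval (a b lo hi : Int) (ha : a ≤ lo) (hb : hi < b)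
    (p : Int → Bool) (hp : ∀ x, p x = true ↔ lo ≤ x ∧ x ≤ hi) :
    (PySem.List.pyRange a b 1).filter p = PySem.List.pyRange lo (hi + 1) 1 := by
  apply List.Pairwise.eq_of_mem_iff (r := (· < · : Int → Int → Prop))
  · exact (PySem.List.pairwise_lt_pyRange_one a b).filter p
  · exact PySem.List.pairwise_lt_pyRange_one lo (hi + 1)
  · intro x
    simp only [List.mem_filter, PySem.List.mem_pyRange_one, hp]
    omega

-- dropping rows on which the row function is empty
theorem pvFlatMapFilter {α β : Type} (l : List α) (p : α → Bool) (g : α → List β)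
    (h : ∀ x ∈ l, p x = false → g x = []) :
    l.flatMap g = (l.filter p).flatMap g := by
  induction l with
  | nil => simp
  | cons a t ih =>
    cases hpa : p a with
    | true => simp [hpa, ih fun x hx => h x (List.mem_cons_of_mem a hx)]
    | false =>
      simp [hpa, h a (List.mem_cons_self) hpa,
        ih fun x hx => h x (List.mem_cons_of_mem a hx)]

-- shifting an integer range
theorem pvPyRangeShift (a b d : Int) :
    PySem.List.pyRange (a + d) (b + d) 1 = (PySem.List.pyRange a b 1).map (· + d) := by
  rw [PySem.List.pyRange_one, PySem.List.pyRange_one, List.map_map]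
  have h : (b + d - (a + d)).toNat = (b - a).toNat := by omega
  rw [h]
  apply List.map_congr_left
  intro x _
  simp [Function.comp]
  ring

theorem even_indices_spec : Claim_equal_even_indices := by
  intro i0 j0 k n _
  unfold Spec_even_indices even_indices even_indices_alt
  set d := PySem.Int.floordiv k 2 with hd
  -- turn A into flatMap form
  simp only [pvFoldlAppendIte,
    PySem.List.foldl_append_eq_flatMap, List.nil_append]
  -- clamp predicate for A's rows
  set P : Int → Bool := fun i => decide (max (i0 - d) (1 - d) ≤ i ∧ i ≤ min (i0 + d) (n - d)) with hP
  rw [pvFlatMapFilter _ P _ (by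
    intro i hi hPi
    rw [PySem.List.mem_pyRange_one] at hi
    have : ¬ (0 < i + d ∧ i + d ≤ n) := by
      simp only [hP, decide_eq_false_iff_not, not_and, not_le] at hPi; omega
    simp only [List.map_eq_nil_iff, List.filter_eq_nil_iff, PySem.List.mem_pyRange_one]
    intro j _ hdec
    simp only [decide_eq_true_eq] at hdec
    exact absurd ⟨hdec.1, hdec.2.1⟩ this)]
  rw [pvFilterPyRangeInterval (i0 - d) (i0 + d + 1) (max (i0 - d) (1 - d))
    (min (i0 + d) (n - d)) (le_max_left _ _)
    (by have := min_le_left (i0 + d) (n - d); omega) P (by intro x; simp [hP])]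
  -- rewrite B's shifted row range as a map of A's clamped row range
  have hshift : PySem.List.pyRange (max 1 i0) (min n (i0 + 2 * d) + 1) 1
      = (PySem.List.pyRange (max (i0 - d) (1 - d)) (min (i0 + d) (n - d) + 1) 1).map (· + d) := by
    rw [← pvPyRangeShift]
    congr 1 <;> omega
  rw [hshift, List.flatMap_map]
  apply List.flatMap_congr
  intro i hi
  rw [PySem.List.mem_pyRange_one] at hi
  have hrow : 0 < i + d ∧ i + d ≤ n ∧ |i0 - i| ≤ d := by
    simp only [Int.abs_eq_natAbs]
    omega
  have habs : i0 + d - (i + d) = i0 - i := by ring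
  simp only [habs]
  rw [pvFilterPyRangeInterval (j0 - d) (j0 + d + 1)
      (max 1 (j0 - (d - |i0 - i|))) (min n (j0 + (d - |i0 - i|)))
      (by have h1 := hrow.2.2; have h2 := abs_nonneg (i0 - i); omega)
      (by have h1 := hrow.2.2; have h2 := abs_nonneg (i0 - i); omega)
      _ (by
        intro x
        simp only [decide_eq_true_eq]
        constructor
        · rintro ⟨_, _, h3, h4, h5⟩
          simp only [Int.abs_eq_natAbs] at h5 ⊢
          omega
        · intro hx
          refine ⟨hrow.1, hrow.2.1, ?_, ?_, ?_⟩ <;>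
            · simp only [Int.abs_eq_natAbs] at hx ⊢
              omega)]
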